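-- pv_equiv track=rewrite | github.com/LukeWood/luketils | luketils/marimo_profile.py | _normalize_function_name
-- ===== SOURCE A (Python) =====
-- def _normalize_function_name(raw_name: str) -> str:
--     """Normalize function name to be readable, replacing non-printable characters.
--
--     Args:
--         raw_name: The raw function name from pstats
--
--     Returns:
--         Normalized function name with non-printable chars replaced
--     """
--     if not raw_name:
--         return "<empty>"
--
--     # Check if name has non-printable characters
--     has_non_printable = any(not c.isprintable() for c in raw_name)
--
--     if has_non_printable:
--         # Replace non-printable with hex representation
--         normalized = ""
--         for c in raw_name:
--             if c.isprintable():
--                 normalized += c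
--             else:
--                 normalized += f"\\x{ord(c):02x}"
--         return f"<{normalized}>"
--
--     return raw_name
-- ===== SOURCE B (Python) =====
-- def _normalize_function_name(raw_name: str) -> str:
--     """Normalize function name: gather the (index, char) pairs of non-printable
--     characters once; if none, return unchanged; otherwise stitch the output from
--     the printable slices between bad positions plus hex escapes (B; slice-based
--     stitching instead of A's char-by-char accumulation loop)."""
--     if not raw_name:
--         return "<empty>"
--     bad = [(i, c) for i, c in enumerate(raw_name) if not c.isprintable()]
--     if not bad:
--         return raw_name
--     parts = []
--     prev = 0
--     for i, c in bad:
--         parts.append(raw_name[prev:i])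
--         parts.append(f"\\x{ord(c):02x}")
--         prev = i + 1
--     parts.append(raw_name[prev:])
--     return "<" + "".join(parts) + ">"
-- ===== Notes on version B (the rewrite author's own statement) =====
-- stated objective: alternative
-- what changed: A scans for non-printables with any() and then escapes char-by-char into a string accumulator; B instead collects the (index, char) pairs of non-printable characters once and, if any exist, stitches the result from the printable slices between those positions plus the hex escapes.
import Mathlib
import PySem

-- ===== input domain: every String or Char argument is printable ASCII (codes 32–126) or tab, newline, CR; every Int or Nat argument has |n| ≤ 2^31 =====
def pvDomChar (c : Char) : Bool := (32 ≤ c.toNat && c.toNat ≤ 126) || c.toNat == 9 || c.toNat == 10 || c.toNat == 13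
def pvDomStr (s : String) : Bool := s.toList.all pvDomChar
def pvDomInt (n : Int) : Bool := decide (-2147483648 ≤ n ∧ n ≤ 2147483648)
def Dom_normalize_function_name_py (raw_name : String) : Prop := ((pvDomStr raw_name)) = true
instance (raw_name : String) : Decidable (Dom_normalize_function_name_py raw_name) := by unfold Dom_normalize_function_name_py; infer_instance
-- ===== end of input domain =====

-- B replaces A's any()-prescan + char-by-char escaping accumulator with an index
-- list of the non-printable positions and slice-based stitching (objective: alternative).

-- ===== PORT A =====
-- c.isprintable(): exact on the Dom alphabet (codes 32–126 printable; 9/10/13 not)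
def pvPrintable (c : Char) : Bool := 32 ≤ c.toNat && c.toNat ≤ 126
-- f"\x{ord(c):02x}": exact for codes < 256 (Dom guarantees < 128)
def pvHexDigit (n : Nat) : Char := if n < 10 then Char.ofNat (48 + n) else Char.ofNat (87 + n)
def pvHexEsc (c : Char) : List Char := '\\' :: 'x' :: [pvHexDigit (c.toNat / 16), pvHexDigit (c.toNat % 16)]
def pvEsc (c : Char) : List Char := if pvPrintable c then [c] else pvHexEsc c

def normalize_function_name_py (raw_name : String) : String :=
  if raw_name.toList = [] then "<empty>"
  else if raw_name.toList.any (fun c => ! pvPrintable c) then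
    String.ofList ('<' :: (raw_name.toList.foldl (fun acc c => acc ++ pvEsc c) []) ++ ['>'])
  else raw_name

-- ===== PORT B =====
-- [(i, c) for i, c in enumerate(raw_name) if not c.isprintable()]
def pvBadPairs (l : List Char) : List (Int × Char) :=
  (PySem.List.enumerate l).filter (fun p => ! pvPrintable p.2)

-- one iteration of B's stitching loop: append raw_name[prev:i] and the escape, set prev = i+1
def pvStep (l : List Char) (st : List Char × Int) (p : Int × Char) : List Char × Int :=
  (st.1 ++ PySem.List.slice l (some st.2) (some p.1) ++ pvHexEsc p.2, p.1 + 1)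

def normalize_function_name_py_alt (raw_name : String) : String :=
  let l := raw_name.toList
  if l = [] then "<empty>"
  else
    let bad := pvBadPairs l
    if bad = [] then raw_name
    else
      let st := bad.foldl (pvStep l) ([], 0)
      String.ofList ('<' :: (st.1 ++ PySem.List.slice l (some st.2) none) ++ ['>'])

-- ===== PRECONDITION & SPEC =====
def Spec_normalize_function_name_py (raw_name : String) (out : String) : Prop := out = normalize_function_name_py_alt raw_name
instance (raw_name : String) (out : String) : Decidable (Spec_normalize_function_name_py raw_name out) := by unfold Spec_normalize_function_name_py; infer_instance

-- ===== CLAIM (what is proved, stated in full; the proofs are below) =====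
def Claim_equal_normalize_function_name_py : Prop := ∀ (raw_name : String), Dom_normalize_function_name_py raw_name → Spec_normalize_function_name_py raw_name (normalize_function_name_py raw_name)

-- ===== LEMMAS AND PROOFS =====

-- A's accumulator loop computes the flat escaped list
theorem pv_foldl_esc (l : List Char) (acc : List Char) :
    l.foldl (fun acc c => acc ++ pvEsc c) acc = acc ++ (l.map pvEsc).flatten := by
  induction l generalizing acc with
  | nil => simp
  | cons c t ih => simp [List.foldl_cons, ih, List.append_assoc]

-- enumerate with a shifted start
theorem pv_enumerate_shift {α : Type} (xs : List α) (s : Int) :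
    PySem.List.enumerate xs (s + 1) = (PySem.List.enumerate xs s).map (fun p => (p.1 + 1, p.2)) := by
  induction xs generalizing s with
  | nil => simp [PySem.List.enumerate_nil]
  | cons x t ih =>
    simp only [PySem.List.enumerate_cons, List.map_cons]
    rw [show s + 1 + 1 = (s + 1) + 1 by ring, ih]

theorem pv_badPairs_cons (c : Char) (t : List Char) :
    pvBadPairs (c :: t) =
      (if pvPrintable c then [] else [((0 : Int), c)]) ++ (pvBadPairs t).map (fun p => (p.1 + 1, p.2)) := by
  unfold pvBadPairs
  rw [PySem.List.enumerate_cons, show (0 : Int) + 1 = 0 + 1 by ring, pv_enumerate_shift]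
  rw [List.filter_cons, List.filter_map]
  by_cases h : pvPrintable c <;> simp [h, Function.comp_def]

theorem pv_badPairs_nil_iff (l : List Char) :
    pvBadPairs l = [] ↔ l.all pvPrintable = true := by
  induction l with
  | nil => simp [pvBadPairs, PySem.List.enumerate_nil]
  | cons c t ih =>
    rw [pv_badPairs_cons]
    by_cases h : pvPrintable c <;> simp [h, ih]

-- indices in pvBadPairs are nonnegative
theorem pv_badPairs_nonneg (l : List Char) (p : Int × Char) (hp : p ∈ pvBadPairs l) : 0 ≤ p.1 := by
  unfold pvBadPairs at hp
  have hmem : p ∈ PySem.List.enumerate l 0 := List.mem_of_mem_filter hp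
  rw [PySem.List.mem_enumerate_iff] at hmem
  obtain ⟨k, hk, rfl⟩ := hmem
  simp

-- the loop only appends to parts: the initial accumulator factors out
theorem pv_acc_out (l : List Char) (bs : List (Int × Char)) (a acc : List Char) (p : Int) :
    bs.foldl (pvStep l) (a ++ acc, p) =
      (a ++ (bs.foldl (pvStep l) (acc, p)).1, (bs.foldl (pvStep l) (acc, p)).2) := by
  induction bs generalizing acc p with
  | nil => simp
  | cons b t ih =>
    simp only [List.foldl_cons, pvStep, List.append_assoc]
    exact ih _ _

theorem pv_acc_out' (l : List Char) (bs : List (Int × Char)) (a : List Char) (p : Int) :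
    bs.foldl (pvStep l) (a, p) =
      (a ++ (bs.foldl (pvStep l) ([], p)).1, (bs.foldl (pvStep l) ([], p)).2) := by
  have h := pv_acc_out l bs a [] p
  simpa using h

-- in-range slices shift through a cons
theorem pv_slice_shift (c : Char) (t : List Char) (p i : Int) (hp : 0 ≤ p) (hi : 0 ≤ i) :
    PySem.List.slice (c :: t) (some (p + 1)) (some (i + 1)) = PySem.List.slice t (some p) (some i) := by
  rw [PySem.List.slice_toNat _ (by omega) (by omega), PySem.List.slice_toNat _ hp hi]
  rw [show (p + 1).toNat = p.toNat + 1 by omega, show (i + 1).toNat = i.toNat + 1 by omega]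
  simp

theorem pv_slice_from_shift (c : Char) (t : List Char) (p : Int) (hp : 0 ≤ p) :
    PySem.List.slice (c :: t) (some (p + 1)) none = PySem.List.slice t (some p) none := by
  rw [PySem.List.slice_from _ (by omega), PySem.List.slice_from _ hp]
  rw [show (p + 1).toNat = p.toNat + 1 by omega]
  simp

-- the stitching loop over shifted pairs on (c :: t) mirrors the loop on t
theorem pv_fold_shift (c : Char) (t : List Char) (bs : List (Int × Char)) (acc : List Char) (p : Int)
    (hp : 0 ≤ p) (hbs : ∀ q ∈ bs, 0 ≤ q.1) :
    (bs.map (fun q => (q.1 + 1, q.2))).foldl (pvStep (c :: t)) (acc, p + 1) =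
      ((bs.foldl (pvStep t) (acc, p)).1, (bs.foldl (pvStep t) (acc, p)).2 + 1) := by
  induction bs generalizing acc p with
  | nil => simp
  | cons b bt ih =>
    have hb : 0 ≤ b.1 := hbs b (List.mem_cons_self)
    simp only [List.map_cons, List.foldl_cons, pvStep]
    rw [pv_slice_shift c t p b.1 hp hb]
    exact ih _ _ (by omega) (fun q hq => hbs q (List.mem_cons_of_mem _ hq))

theorem pv_fold_snd_nonneg (l : List Char) (bs : List (Int × Char)) (acc : List Char) (p : Int)
    (hp : 0 ≤ p) (hbs : ∀ q ∈ bs, 0 ≤ q.1) :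
    0 ≤ (bs.foldl (pvStep l) (acc, p)).2 := by
  induction bs generalizing acc p with
  | nil => simpa
  | cons b bt ih =>
    have hb : 0 ≤ b.1 := hbs b (List.mem_cons_self)
    simp only [List.foldl_cons, pvStep]
    exact ih _ _ (by omega) (fun q hq => hbs q (List.mem_cons_of_mem _ hq))

-- MAIN: B's stitching equals A's flat escaped list
theorem pv_stitch_eq (l : List Char) :
    ((pvBadPairs l).foldl (pvStep l) ([], 0)).1 ++
      PySem.List.slice l (some ((pvBadPairs l).foldl (pvStep l) ([], 0)).2) none =
      (l.map pvEsc).flatten := by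
  induction l with
  | nil =>
    simp [pvBadPairs, PySem.List.enumerate_nil, PySem.List.slice_from _ (le_refl (0:Int))]
  | cons c t ih =>
    have hnn := pv_badPairs_nonneg t
    by_cases hc : pvPrintable c
    · rw [pv_badPairs_cons, if_pos hc, List.nil_append]
      cases hbt : pvBadPairs t with
      | nil =>
        simp only [List.map_nil, List.foldl_nil]
        rw [PySem.List.slice_from _ (le_refl (0:Int))]
        rw [hbt] at ih
        simp only [List.foldl_nil] at ih
        rw [PySem.List.slice_from _ (le_refl (0:Int))] at ih
        simp only [Int.toNat_zero, List.drop_zero, List.nil_append] at ih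
        simp only [List.map_cons, List.flatten_cons, pvEsc, hc, if_true, List.singleton_append]
        exact congrArg (c :: ·) ih
      | cons b bs =>
        have hb0 : 0 ≤ b.1 :=
          pv_badPairs_nonneg t b (by rw [hbt]; exact List.mem_cons_self)
        have hbs0 : ∀ q ∈ bs, 0 ≤ q.1 := fun q hq =>
          pv_badPairs_nonneg t q (by rw [hbt]; exact List.mem_cons_of_mem _ hq)
        simp only [List.map_cons, List.foldl_cons, pvStep, List.nil_append]
        -- first slice crosses c: (c::t)[0:b.1+1] = c :: t[0:b.1]
        have hsl : PySem.List.slice (c :: t) (some (0 : Int)) (some (b.1 + 1)) =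
            c :: PySem.List.slice t (some (0 : Int)) (some b.1) := by
          rw [PySem.List.slice_toNat _ (le_refl (0:Int)) (by omega),
              PySem.List.slice_toNat _ (le_refl (0:Int)) hb0]
          rw [show (b.1 + 1).toNat = b.1.toNat + 1 by omega]
          simp [List.take_succ_cons]
        rw [hsl]
        have hsplit : (c :: PySem.List.slice t (some (0:Int)) (some b.1) ++ pvHexEsc b.2) =
            [c] ++ (PySem.List.slice t (some (0:Int)) (some b.1) ++ pvHexEsc b.2) := by simp
        rw [hsplit]
        rw [pv_fold_shift c t bs _ (b.1 + 1) (by omega) hbs0]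
        rw [pv_acc_out t bs [c] _ (b.1 + 1)]
        rw [pv_slice_from_shift c t _ (pv_fold_snd_nonneg t bs _ (b.1 + 1) (by omega) hbs0)]
        rw [hbt] at ih
        simp only [List.foldl_cons, pvStep, List.nil_append] at ih
        dsimp only
        rw [List.append_assoc, ih]
        simp [pvEsc, hc]
    · rw [pv_badPairs_cons, if_neg hc]
      simp only [List.singleton_append, List.foldl_cons, pvStep, List.nil_append]
      have hsl0 : PySem.List.slice (c :: t) (some (0 : Int)) (some (0 : Int)) = [] := by
        rw [PySem.List.slice_toNat _ (le_refl (0:Int)) (le_refl (0:Int))]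
        simp
      rw [hsl0, List.nil_append]
      rw [pv_fold_shift c t (pvBadPairs t) (pvHexEsc c) 0 (le_refl _) hnn]
      rw [pv_acc_out' t (pvBadPairs t) (pvHexEsc c) 0]
      rw [pv_slice_from_shift c t _ (pv_fold_snd_nonneg t (pvBadPairs t) [] 0 (le_refl _) hnn)]
      dsimp only
      rw [List.append_assoc, ih]
      simp [pvEsc, hc]

-- ===== VERDICT (by name: the statement is the Claim_ definition above) =====
theorem normalize_function_name_py_spec : Claim_equal_normalize_function_name_py := by
  intro raw_name _
  unfold Spec_normalize_function_name_py normalize_function_name_py normalize_function_name_py_alt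
  by_cases hnil : raw_name.toList = []
  · simp [hnil]
  · simp only [hnil, if_false]
    by_cases hany : raw_name.toList.any (fun c => ! pvPrintable c)
    · have hbad : ¬ pvBadPairs raw_name.toList = [] := by
        rw [pv_badPairs_nil_iff]
        simp only [List.any_eq_true] at hany
        obtain ⟨c, hc, hcp⟩ := hany
        simp only [List.all_eq_true]
        intro h
        have hc' := h c hc
        rw [hc'] at hcp
        exact Bool.false_ne_true hcp
      simp only [hany, hbad, if_true, if_false, pv_foldl_esc, List.nil_append]
      rw [pv_stitch_eq raw_name.toList]
    · have hbad : pvBadPairs raw_name.toList = [] := by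
        rw [pv_badPairs_nil_iff]
        simp only [List.all_eq_true]
        intro c hc
        by_contra h
        apply hany
        rw [List.any_eq_true]
        refine ⟨c, hc, ?_⟩
        rw [Bool.not_eq_true] at h
        rw [h]
        rfl
      simp only [hbad, if_true]
      rw [if_neg (by simpa using hany)]
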